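-- pv_equiv track=rewrite | github.com/rockchen1989/daily_stock_analysis | src/services/name_to_code_resolver.py | _build_reverse_map_no_duplicates
-- ===== SOURCE A (Python) =====
-- from typing import Any, Dict, Iterable, List, Optional, Set, Tuple
--
-- def _build_reverse_map_no_duplicates(
--     code_to_name: Dict[str, str],
-- ) -> Dict[str, str]:
--     """
--     Build name -> code map. If a name maps to multiple codes (ambiguous), exclude it.
--     """
--     name_to_codes: Dict[str, Set[str]] = {}
--     for code, name in code_to_name.items():
--         if not name or not code:
--             continue
--         cleaned_name = name.strip()
--         if not cleaned_name:
--             continue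
--         name_to_codes.setdefault(cleaned_name, set()).add(code.strip().upper())
--     return {name: next(iter(codes)) for name, codes in name_to_codes.items() if len(codes) == 1}
-- ===== SOURCE B (Python) =====
-- from typing import Dict
--
--
-- def _build_reverse_map_no_duplicates(
--     code_to_name: Dict[str, str],
-- ) -> Dict[str, str]:
--     """
--     Build name -> code map. If a name maps to multiple codes (ambiguous), exclude it.
--
--     Brute force over a flat cleaned pair list: keep a pair iff it is the first
--     occurrence of its name and every pair with that name carries the same code.
--     No per-name grouping structure is maintained.
--     """
--     pairs = []
--     for code, name in code_to_name.items():
--         if not name or not code: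
--             continue
--         cleaned_name = name.strip()
--         if not cleaned_name:
--             continue
--         pairs.append((cleaned_name, code.strip().upper()))
--     return {
--         n: c
--         for i, (n, c) in enumerate(pairs)
--         if all(m != n for m, _ in pairs[:i])
--         and all(d == c for m, d in pairs if m == n)
--     }
-- ===== Notes on version B (the rewrite author's own statement) =====
-- stated objective: alternative
-- what changed: Instead of grouping a dict of cleaned-code sets per name, B flattens the input into a cleaned (name, code) pair list and keeps a pair by a brute-force scan: it must be the first occurrence of its name and every pair with that name must carry the same code; no per-name grouping structure exists.
import Mathlib
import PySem

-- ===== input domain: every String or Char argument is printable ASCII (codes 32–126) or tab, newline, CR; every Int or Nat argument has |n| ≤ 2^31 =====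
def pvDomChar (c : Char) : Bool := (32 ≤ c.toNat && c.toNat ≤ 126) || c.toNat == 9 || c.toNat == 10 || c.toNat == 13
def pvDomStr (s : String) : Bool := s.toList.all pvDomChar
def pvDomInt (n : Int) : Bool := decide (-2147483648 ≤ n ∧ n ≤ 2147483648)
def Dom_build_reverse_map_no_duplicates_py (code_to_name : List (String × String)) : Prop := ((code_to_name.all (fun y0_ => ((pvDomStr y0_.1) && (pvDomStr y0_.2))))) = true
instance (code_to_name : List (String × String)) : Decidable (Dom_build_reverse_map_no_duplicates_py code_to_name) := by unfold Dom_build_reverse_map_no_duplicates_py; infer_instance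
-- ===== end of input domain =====

-- B replaces A's per-name dict of cleaned-code sets by a flat cleaned pair list scanned
-- brute-force: keep a pair iff it is the first occurrence of its name and every pair with
-- that name carries the same code (objective: alternative; same return value).
-- The dict parameter is marshalled as an association list via PySem.Dict.ofList (Python dict semantics).

-- ===== PORT A =====
def build_reverse_map_no_duplicates_py (code_to_name : List (String × String)) : List (String × String) :=
  -- for code, name in code_to_name.items():
  let items := (PySem.Dict.ofList code_to_name).items
  let name_to_codes : PySem.Dict String (PySem.Set String) :=
    items.foldl (fun m cn =>
      if cn.2 = "" || cn.1 = "" then m            -- if not name or not code: continue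
      else
        let cleaned_name := PySem.Str.strip cn.2
        if cleaned_name = "" then m               -- if not cleaned_name: continue
        else
          -- name_to_codes.setdefault(cleaned_name, set()).add(code.strip().upper())
          m.modify cleaned_name PySem.Set.empty
            (fun s => PySem.Set.add s (PySem.Str.upper (PySem.Str.strip cn.1))))
      PySem.Dict.empty
  -- {name: next(iter(codes)) for name, codes in name_to_codes.items() if len(codes) == 1}
  -- next(iter(codes)) on a singleton set is its sole (= first) element: headD ""
  (name_to_codes.items.foldl (fun r nc =>
      if PySem.Set.len nc.2 = 1 then r.insert nc.1 (nc.2.headD "") else r)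
    PySem.Dict.empty).items

-- ===== PORT B =====
-- stage 1 of Source B: the flat list of cleaned (name, code) pairs
def pvBpairs (items : List (String × String)) : List (String × String) :=
  items.foldl (fun pairs cn =>
    if cn.2 = "" || cn.1 = "" then pairs          -- if not name or not code: continue
    else
      let cleaned_name := PySem.Str.strip cn.2
      if cleaned_name = "" then pairs             -- if not cleaned_name: continue
      else pairs ++ [(cleaned_name, PySem.Str.upper (PySem.Str.strip cn.1))]) []

-- stage 2 of Source B: the brute-force dict comprehension over enumerate(pairs)
def pvBresult (pairs : List (String × String)) : List (String × String) :=
  ((PySem.List.enumerate pairs 0).foldl (fun r ip =>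
      if ((PySem.List.slice pairs none (some ip.1)).all (fun q => !(q.1 == ip.2.1)))   -- all(m != n for m, _ in pairs[:i])
         && ((pairs.filter (fun q => q.1 == ip.2.1)).all (fun q => q.2 == ip.2.2))     -- all(d == c for m, d in pairs if m == n)
      then r.insert ip.2.1 ip.2.2 else r)
    PySem.Dict.empty).items

def build_reverse_map_no_duplicates_py_alt (code_to_name : List (String × String)) : List (String × String) :=
  pvBresult (pvBpairs ((PySem.Dict.ofList code_to_name).items))

-- ===== PRECONDITION & SPEC =====
def Spec_build_reverse_map_no_duplicates_py (code_to_name : List (String × String)) (out : List (String × String)) : Prop := out = build_reverse_map_no_duplicates_py_alt code_to_name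
instance (code_to_name : List (String × String)) (out : List (String × String)) : Decidable (Spec_build_reverse_map_no_duplicates_py code_to_name out) := by unfold Spec_build_reverse_map_no_duplicates_py; infer_instance

-- ===== CLAIM (what is proved, stated in full; the proofs are below) =====
def Claim_equal_build_reverse_map_no_duplicates_py : Prop := ∀ (code_to_name : List (String × String)), Dom_build_reverse_map_no_duplicates_py code_to_name → Spec_build_reverse_map_no_duplicates_py code_to_name (build_reverse_map_no_duplicates_py code_to_name)

-- ===== LEMMAS AND PROOFS =====

-- the guard both loops apply to a raw (code, name) item
def pvGuard (p : String × String) : Bool :=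
  !(p.2 == "") && !(p.1 == "") && !(PySem.Str.strip p.2 == "")

-- the cleaned (name, code) pair an accepted item contributes
def pvClean (p : String × String) : String × String :=
  (PySem.Str.strip p.2, PySem.Str.upper (PySem.Str.strip p.1))

-- the accepted, cleaned item stream both programs effectively process
def pvE (l : List (String × String)) : List (String × String) :=
  ((PySem.Dict.ofList l).items.filter pvGuard).map pvClean

-- cleaned codes recorded for a given cleaned name, in order
def pvVals (e : List (String × String)) (n : String) : List String :=
  (e.filter (fun p => p.1 == n)).map (·.2)

-- the output pair a kept name contributes (its first cleaned code)
def pvF (e : List (String × String)) (k : String) : String × String :=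
  (k, (pvVals e k).headD "")

-- the common normal form of both outputs: first-occurrence names whose codes all agree
def pvN (e : List (String × String)) : List (String × String) :=
  ((PySem.Set.ofList (e.map (·.1))).filter
      (fun k => (pvVals e k).all (fun d => d == (pvVals e k).headD ""))).map (pvF e)

-- A's grouping state, as a fold over the cleaned stream
def pvMA (e : List (String × String)) : PySem.Dict String (PySem.Set String) :=
  e.foldl (fun m q => m.modify q.1 PySem.Set.empty (fun s => PySem.Set.add s q.2)) PySem.Dict.empty

theorem pvVals_append (e : List (String × String)) (q : String × String) (n : String) :
    pvVals (e ++ [q]) n = pvVals e n ++ (if q.1 = n then [q.2] else []) := by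
  simp only [pvVals, List.filter_append, List.map_append]
  by_cases h : q.1 = n <;> simp [h]

theorem pvVals_cons (q : String × String) (e : List (String × String)) (n : String) :
    pvVals (q :: e) n = (if q.1 = n then [q.2] else []) ++ pvVals e n := by
  simp only [pvVals, List.filter_cons]
  by_cases h : q.1 = n <;> simp [h]

theorem pvVals_eq_nil (e : List (String × String)) (k : String)
    (h : k ∉ e.map (·.1)) : pvVals e k = [] := by
  simp only [pvVals, List.map_eq_nil_iff, List.filter_eq_nil_iff]
  intro p hp
  simp only [beq_iff_eq]
  intro hpk
  exact h (List.mem_map.mpr ⟨p, hp, hpk⟩)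

-- names appearing in the stream have a nonempty value list
theorem pv_vals_ne_nil (e : List (String × String)) (k : String)
    (hk : k ∈ PySem.Set.ofList (e.map (·.1))) : pvVals e k ≠ [] := by
  rw [PySem.Set.mem_ofList] at hk
  obtain ⟨p, hp, hpk⟩ := List.mem_map.mp hk
  have hm : p.2 ∈ pvVals e k := by
    rw [pvVals]
    exact List.mem_map.mpr ⟨p, List.mem_filter.mpr ⟨hp, by simp [hpk]⟩, rfl⟩
  intro hnil
  rw [hnil] at hm
  simp at hm

theorem pv_headD_append (l t : List String) (d : String) (h : l ≠ []) :
    (l ++ t).headD d = l.headD d := by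
  cases l with
  | nil => exact absurd rfl h
  | cons x xs => rfl

-- A's loop over the raw items equals pvMA of the cleaned stream
theorem pvA_loop_eq (l : List (String × String)) :
    ((PySem.Dict.ofList l).items.foldl (fun m cn =>
      if cn.2 = "" || cn.1 = "" then m
      else
        let cleaned_name := PySem.Str.strip cn.2
        if cleaned_name = "" then m
        else m.modify cleaned_name PySem.Set.empty
          (fun s => PySem.Set.add s (PySem.Str.upper (PySem.Str.strip cn.1))))
      PySem.Dict.empty)
    = pvMA (pvE l) := by
  rw [PySem.List.foldl_congr_mem _ _
      (fun m cn => if pvGuard cn = true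
        then m.modify (pvClean cn).1 PySem.Set.empty (fun s => PySem.Set.add s (pvClean cn).2) else m) _
      (by
        intro acc x _
        by_cases h2 : x.2 = "" <;> by_cases h1 : x.1 = "" <;>
          by_cases hs : PySem.Str.strip x.2 = "" <;>
          simp [pvGuard, pvClean, h1, h2, hs])]
  rw [PySem.List.foldl_if_eq_foldl_filter]
  simp only [pvE, pvMA, List.foldl_map]

-- B's pair-building loop over the raw items equals the cleaned stream
theorem pvB_pairs_eq (l : List (String × String)) :
    pvBpairs ((PySem.Dict.ofList l).items) = pvE l := by
  rw [pvBpairs, PySem.List.foldl_congr_mem _ _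
      (fun pairs cn => if pvGuard cn = true then pairs ++ [pvClean cn] else pairs) _
      (by
        intro acc x _
        by_cases h2 : x.2 = "" <;> by_cases h1 : x.1 = "" <;>
          by_cases hs : PySem.Str.strip x.2 = "" <;>
          simp [pvGuard, pvClean, h1, h2, hs])]
  rw [PySem.List.foldl_append_if]
  simp [pvE]

-- A's dict groups exactly the cleaned codes of each name
theorem pvMA_getD_aux (e : List (String × String)) (d : PySem.Dict String (PySem.Set String)) (n : String) :
    (e.foldl (fun m q => m.modify q.1 PySem.Set.empty (fun s => PySem.Set.add s q.2)) d).getD n PySem.Set.empty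
    = PySem.Set.update (d.getD n PySem.Set.empty) (pvVals e n) := by
  induction e generalizing d with
  | nil => simp [pvVals, PySem.Set.update_nil]
  | cons q e ih =>
    rw [List.foldl_cons, ih, pvVals_cons]
    by_cases h : q.1 = n
    · subst h
      rw [PySem.Dict.getD_modify]
      simp [PySem.Set.update_cons]
    · rw [PySem.Dict.getD_modify]
      simp [h, Ne.symm h]

theorem pvMA_getD (e : List (String × String)) (n : String) :
    (pvMA e).getD n PySem.Set.empty = PySem.Set.ofList (pvVals e n) := by
  rw [pvMA, pvMA_getD_aux]
  simp [PySem.Set.update_nil_left]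

theorem pvMA_keys (e : List (String × String)) :
    (pvMA e).keys = PySem.Set.ofList (e.map (·.1)) := by
  have h := PySem.Dict.keys_foldl_modify_key e (fun q : String × String => q.1)
    PySem.Set.empty (fun _ q s => PySem.Set.add s q.2) PySem.Dict.empty
  simpa [pvMA, PySem.Set.update_nil_left] using h

theorem pvMA_keys_nodup (e : List (String × String)) : (pvMA e).keys.Nodup := by
  rw [pvMA_keys]; exact PySem.Set.nodup_ofList _

theorem pv_filter_map_congr {α β : Type} (K : List α) (c c' : α → Bool) (f f' : α → β)
    (hc : ∀ k ∈ K, c k = c' k) (hf : ∀ k ∈ K, f k = f' k) :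
    (K.filter c).map f = (K.filter c').map f' := by
  rw [List.filter_congr hc]
  exact List.map_congr_left (fun k hk => hf k (List.mem_of_mem_filter hk))

-- len(set(xs)) == 1 says all elements of a nonempty xs equal its head
theorem pv_set_singleton (x : String) (t : List String) :
    PySem.Set.len (PySem.Set.ofList (x :: t)) = 1 ↔ ∀ c ∈ x :: t, c = x := by
  rw [PySem.Set.ofList_cons, PySem.Set.len]
  constructor
  · intro h c hc
    have hlen : ((PySem.Set.ofList t).discard x).length = 0 := by
      simp only [List.length_cons] at h
      omega
    have hnil : (PySem.Set.ofList t).discard x = [] := List.eq_nil_of_length_eq_zero hlen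
    rcases List.mem_cons.mp hc with h' | h'
    · exact h'
    · by_contra hne
      have hmem : c ∈ (PySem.Set.ofList t).discard x := by
        rw [PySem.Set.discard, List.mem_filter]
        exact ⟨(PySem.Set.mem_ofList _ _).2 h', by simp [hne]⟩
      rw [hnil] at hmem
      simp at hmem
  · intro h
    have hnil : (PySem.Set.ofList t).discard x = [] := by
      rw [PySem.Set.discard, List.filter_eq_nil_iff]
      intro c hc
      have := h c (List.mem_cons_of_mem _ ((PySem.Set.mem_ofList _ _).1 hc))
      simp [this]
    rw [hnil]
    rfl

theorem pv_headD_ofList (x : String) (t : List String) :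
    (PySem.Set.ofList (x :: t)).headD "" = x := by
  rw [PySem.Set.ofList_cons]; rfl

-- the first-occurrence filter over enumerate(e) extracts exactly the dedup of the names,
-- each paired with its first cleaned code
theorem pv_firsts (e : List (String × String)) :
    (((PySem.List.enumerate e 0).filter (fun ip =>
        (PySem.List.slice e none (some ip.1)).all (fun q => !(q.1 == ip.2.1)))).map (·.2))
    = (PySem.Set.ofList (e.map (·.1))).map (pvF e) := by
  induction e using List.reverseRecOn with
  | nil => rfl
  | append_singleton e q ih =>
    rw [PySem.List.enumerate_append, List.filter_append, List.map_append]
    -- the old entries: their slice of e ++ [q] is their slice of e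
    have hold : (PySem.List.enumerate e 0).filter (fun ip =>
          (PySem.List.slice (e ++ [q]) none (some ip.1)).all (fun q' => !(q'.1 == ip.2.1)))
        = (PySem.List.enumerate e 0).filter (fun ip =>
          (PySem.List.slice e none (some ip.1)).all (fun q' => !(q'.1 == ip.2.1))) := by
      apply List.filter_congr
      intro ip hip
      obtain ⟨k, hk, rfl⟩ := (PySem.List.mem_enumerate_iff _ _ _).1 hip
      simp only [zero_add, PySem.List.slice_to_natCast]
      rw [List.take_append_of_le_length (le_of_lt hk)]
    rw [hold]
    -- the new entry: its slice is all of e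
    have hnew : ∀ ip ∈ PySem.List.enumerate [q] (0 + (e.length : Int)),
        ip = ((e.length : Int), q) := by
      intro ip hip
      obtain ⟨k, hk, rfl⟩ := (PySem.List.mem_enumerate_iff _ _ _).1 hip
      have hk0 : k = 0 := by simpa using hk
      subst hk0
      simp
    have hslice : PySem.List.slice (e ++ [q]) none (some ((e.length : Int))) = e := by
      rw [PySem.List.slice_to_natCast]
      exact List.take_left
    by_cases hmem : q.1 ∈ e.map (·.1)
    · -- q's name was seen: the new entry is dropped and the name set is unchanged
      have hko : (PySem.List.enumerate [q] (0 + (e.length : Int))).filter (fun ip =>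
            (PySem.List.slice (e ++ [q]) none (some ip.1)).all (fun q' => !(q'.1 == ip.2.1))) = [] := by
        rw [List.filter_eq_nil_iff]
        intro ip hip
        rw [hnew ip hip]
        simp only [hslice, List.all_eq_true, Bool.not_eq_eq_eq_not, Bool.not_true]
        intro hall
        obtain ⟨p, hp, hpk⟩ := List.mem_map.mp hmem
        have := hall p hp
        simp [hpk] at this
      rw [hko, List.map_nil, List.append_nil, ih]
      have hK : PySem.Set.ofList ((e ++ [q]).map (·.1)) = PySem.Set.ofList (e.map (·.1)) := by
        simp only [List.map_append, List.map_cons, List.map_nil]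
        rw [PySem.Set.ofList_append_singleton]
        have hm : q.1 ∈ PySem.Set.ofList (e.map (·.1)) := (PySem.Set.mem_ofList _ _).2 hmem
        simp [PySem.Set.add, PySem.Set.contains, hm]
      rw [hK]
      apply List.map_congr_left
      intro k hk
      have hne : pvVals e k ≠ [] := pv_vals_ne_nil e k hk
      simp only [pvF, pvVals_append]
      rw [pv_headD_append _ _ _ hne]
    · -- q's name is new: the new entry survives and carries (q.1, q.2)
      have hko : (PySem.List.enumerate [q] (0 + (e.length : Int))).filter (fun ip =>
            (PySem.List.slice (e ++ [q]) none (some ip.1)).all (fun q' => !(q'.1 == ip.2.1)))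
          = [((e.length : Int), q)] := by
        have h1 : PySem.List.enumerate [q] (0 + (e.length : Int)) = [((e.length : Int), q)] := by
          rw [PySem.List.enumerate_cons]
          simp [PySem.List.enumerate_nil]
        rw [h1, List.filter_cons]
        have : (PySem.List.slice (e ++ [q]) none (some (((e.length : Int), q).1))).all
            (fun q' => !(q'.1 == ((e.length : Int), q).2.1)) = true := by
          simp only [hslice, List.all_eq_true, Bool.not_eq_eq_eq_not, Bool.not_true]
          intro p hp
          simp only [beq_eq_false_iff_ne, ne_eq]
          intro hpk
          exact hmem (List.mem_map.mpr ⟨p, hp, hpk⟩)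
        rw [this]
        simp
      rw [hko, ih]
      have hK : PySem.Set.ofList ((e ++ [q]).map (·.1))
          = PySem.Set.ofList (e.map (·.1)) ++ [q.1] := by
        simp only [List.map_append, List.map_cons, List.map_nil]
        rw [PySem.Set.ofList_append_singleton]
        have hm : q.1 ∉ PySem.Set.ofList (e.map (·.1)) := by
          rw [PySem.Set.mem_ofList]; exact hmem
        simp [PySem.Set.add, PySem.Set.contains, hm]
      rw [hK, List.map_append]
      congr 1
      · apply List.map_congr_left
        intro k hk
        have hkk : k ≠ q.1 := by
          intro h
          exact hmem (h ▸ (PySem.Set.mem_ofList _ _).1 hk)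
        simp only [pvF, pvVals_append]
        simp [Ne.symm hkk]
      · simp only [List.map_cons, List.map_nil, pvF, pvVals_append]
        rw [pvVals_eq_nil e q.1 hmem]
        simp

-- B's brute-force stage computes the normal form
theorem pvB_result_eq (e : List (String × String)) : pvBresult e = pvN e := by
  have hfe := PySem.List.foldl_if_eq_foldl_filter
    (fun ip : Int × (String × String) =>
      ((PySem.List.slice e none (some ip.1)).all (fun q => !(q.1 == ip.2.1)))
      && ((e.filter (fun q => q.1 == ip.2.1)).all (fun q => q.2 == ip.2.2)))
    (fun (r : PySem.Dict String String) ip => r.insert ip.2.1 ip.2.2)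
    (PySem.List.enumerate e 0) PySem.Dict.empty
  rw [pvBresult, hfe]
  -- split the conjunction: first-occurrence filter, then the all-codes-agree filter
  have hsplit : (PySem.List.enumerate e 0).filter (fun ip =>
        ((PySem.List.slice e none (some ip.1)).all (fun q => !(q.1 == ip.2.1)))
        && ((e.filter (fun q => q.1 == ip.2.1)).all (fun q => q.2 == ip.2.2)))
      = ((PySem.List.enumerate e 0).filter (fun ip =>
          (PySem.List.slice e none (some ip.1)).all (fun q => !(q.1 == ip.2.1)))).filter
        (fun ip => (e.filter (fun q => q.1 == ip.2.1)).all (fun q => q.2 == ip.2.2)) := by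
    rw [List.filter_filter]
    apply List.filter_congr
    intro ip _
    exact (Bool.and_comm _ _).symm
  rw [hsplit]
  set F := ((PySem.List.enumerate e 0).filter (fun ip =>
      (PySem.List.slice e none (some ip.1)).all (fun q => !(q.1 == ip.2.1)))).filter
    (fun ip => (e.filter (fun q => q.1 == ip.2.1)).all (fun q => q.2 == ip.2.2)) with hF
  -- F's name components are distinct, so the dict-building fold just appends
  have hFmap : F.map (·.2)
      = ((PySem.Set.ofList (e.map (·.1))).filter
          (fun k => (pvVals e k).all (fun d => d == (pvVals e k).headD ""))).map (pvF e) := by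
    rw [hF, show (fun ip : Int × (String × String) =>
        (e.filter (fun q => q.1 == ip.2.1)).all (fun q => q.2 == ip.2.2))
      = (fun p : String × String => (e.filter (fun q => q.1 == p.1)).all (fun q => q.2 == p.2)) ∘ (·.2)
      from rfl, ← List.filter_map, pv_firsts, List.filter_map]
    apply pv_filter_map_congr
    · intro k _
      simp only [Function.comp_apply, pvF, pvVals, List.all_map]
      rfl
    · intro k _
      rfl
  have hnodup : (F.map (fun ip => ip.2.1)).Nodup := by
    have : F.map (fun ip => ip.2.1) = (F.map (·.2)).map (·.1) := by
      rw [List.map_map]; rfl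
    rw [this, hFmap, List.map_map]
    have hid : ((fun p : String × String => p.1) ∘ pvF e) = id := by
      funext k; rfl
    rw [hid, List.map_id]
    exact ((PySem.Set.nodup_ofList _).filter _)
  rw [PySem.Dict.items_foldl_insert_fresh F (fun ip => ip.2.1) (fun ip => ip.2.2)
    PySem.Dict.empty (fun a _ => PySem.Dict.contains_empty _) hnodup]
  have : F.map (fun ip => (ip.2.1, ip.2.2)) = F.map (·.2) := by
    apply List.map_congr_left; intro ip _; rfl
  rw [show (PySem.Dict.empty : PySem.Dict String String).items = [] from rfl, List.nil_append,
    this, hFmap, pvN]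

-- A computes the normal form too
theorem pvA_eq (l : List (String × String)) :
    build_reverse_map_no_duplicates_py l = pvN (pvE l) := by
  simp only [build_reverse_map_no_duplicates_py]
  rw [pvA_loop_eq l]
  set e := pvE l with he
  set K := PySem.Set.ofList (e.map (·.1)) with hK
  -- turn the Prop-ite of the final loop into a Bool-ite
  rw [PySem.List.foldl_congr_mem _ _
      (fun (r : PySem.Dict String String) nc =>
        if (decide (PySem.Set.len nc.2 = 1)) = true then r.insert nc.1 (nc.2.headD "") else r) _
      (by
        intro acc nc _
        simp)]
  rw [PySem.List.foldl_if_eq_foldl_filter]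
  have hsub : (((pvMA e).items.filter (fun nc => decide (PySem.Set.len nc.2 = 1))).map
      (fun nc => nc.1)).Sublist ((pvMA e).items.map (fun nc => nc.1)) :=
    List.Sublist.map _ List.filter_sublist
  have hnodup : (((pvMA e).items.filter (fun nc => decide (PySem.Set.len nc.2 = 1))).map
      (fun nc => nc.1)).Nodup := (pvMA_keys_nodup e).sublist hsub
  have hfr := PySem.Dict.items_foldl_insert_fresh
    ((pvMA e).items.filter (fun nc => decide (PySem.Set.len nc.2 = 1)))
    (fun nc => nc.1) (fun nc => nc.2.headD "")
    (PySem.Dict.empty : PySem.Dict String String)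
    (fun a _ => PySem.Dict.contains_empty _) hnodup
  rw [hfr]
  rw [show (PySem.Dict.empty : PySem.Dict String String).items = [] from rfl, List.nil_append]
  have hitems : (pvMA e).items = K.map (fun k => (k, PySem.Set.ofList (pvVals e k))) := by
    rw [PySem.Dict.items_eq_map_keys _ (pvMA_keys_nodup e) PySem.Set.empty, pvMA_keys]
    exact List.map_congr_left (fun k _ => by rw [pvMA_getD])
  rw [hitems, List.filter_map, List.map_map, pvN]
  apply pv_filter_map_congr
  · intro k hk
    obtain ⟨x, t, hv⟩ := List.exists_cons_of_ne_nil (pv_vals_ne_nil e k hk)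
    simp only [Function.comp_apply, hv]
    rw [Bool.eq_iff_iff]
    simp only [decide_eq_true_eq, List.all_eq_true, beq_iff_eq, List.headD_cons]
    exact pv_set_singleton x t
  · intro k hk
    obtain ⟨x, t, hv⟩ := List.exists_cons_of_ne_nil (pv_vals_ne_nil e k hk)
    simp only [Function.comp_apply, pvF, hv, pv_headD_ofList, List.headD_cons]

-- ===== VERDICT (by name: the statement is the Claim_ definition above) =====
theorem build_reverse_map_no_duplicates_py_spec : Claim_equal_build_reverse_map_no_duplicates_py := by
  intro l _
  show build_reverse_map_no_duplicates_py l = build_reverse_map_no_duplicates_py_alt l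
  rw [pvA_eq, build_reverse_map_no_duplicates_py_alt, pvB_pairs_eq, pvB_result_eq]
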